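-- pv_equiv track=rewrite | github.com/opensearch-project/opensearch-benchmark | osbenchmark/builder/builder.py | nodes_by_host
-- ===== SOURCE A (Python) =====
-- def nodes_by_host(ip_port_pairs):
--     nodes = {}
--     node_id = 0
--     for ip_port in ip_port_pairs:
--         if ip_port not in nodes:
--             nodes[ip_port] = []
--         nodes[ip_port].append(node_id)
--         node_id += 1
--     return nodes
-- ===== SOURCE B (Python) =====
-- def nodes_by_host(ip_port_pairs):
--     pairs = list(ip_port_pairs)
--     return {key: [i for i, p in enumerate(pairs) if p == key]
--             for key in dict.fromkeys(pairs)}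
-- ===== Notes on version B (the rewrite author's own statement) =====
-- stated objective: alternative
-- what changed: Replaced the single accumulating dict-building pass with first-occurrence key extraction (dict.fromkeys) followed by a per-key enumerate scan collecting the indices.
import Mathlib
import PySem

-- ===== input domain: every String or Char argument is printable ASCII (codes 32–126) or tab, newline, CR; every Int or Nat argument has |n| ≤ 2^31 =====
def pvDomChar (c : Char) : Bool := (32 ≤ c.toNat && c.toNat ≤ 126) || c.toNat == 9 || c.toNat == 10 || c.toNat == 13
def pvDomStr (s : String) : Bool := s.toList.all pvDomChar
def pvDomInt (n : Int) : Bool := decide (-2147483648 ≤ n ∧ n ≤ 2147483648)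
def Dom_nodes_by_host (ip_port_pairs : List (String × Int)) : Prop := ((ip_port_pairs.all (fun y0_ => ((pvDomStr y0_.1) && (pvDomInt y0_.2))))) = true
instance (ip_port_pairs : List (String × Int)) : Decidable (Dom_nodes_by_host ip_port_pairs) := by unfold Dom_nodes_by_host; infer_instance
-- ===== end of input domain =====

-- B replaces A's single accumulating dict pass with first-occurrence key extraction followed by a per-key index scan (alternative decomposition, not faster).


-- ===== PORT A =====
-- A's loop body as a named step: 'if ip_port not in nodes: nodes[ip_port] = []' then 'nodes[ip_port].append(node_id)'; 'node_id += 1'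
def nodesByHostStep (st : PySem.Dict (String × Int) (List Int) × Int) (ip_port : String × Int) :
    PySem.Dict (String × Int) (List Int) × Int :=
  let nodes := if st.1.contains ip_port then st.1 else st.1.insert ip_port []
  (nodes.modify ip_port [] (fun l => l ++ [st.2]), st.2 + 1)

def nodes_by_host (ip_port_pairs : List (String × Int)) : List (String × Int × List Int) :=
  let st := ip_port_pairs.foldl nodesByHostStep (PySem.Dict.empty, 0)
  -- the returned dict's items, reshaped to the convention's right-nested triple
  st.1.items.map (fun kv => (kv.1.1, kv.1.2, kv.2))

-- ===== PORT B =====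
def nodes_by_host_alt (ip_port_pairs : List (String × Int)) : List (String × Int × List Int) :=
  (PySem.List.dedup ip_port_pairs).map (fun key =>
    (key.1, key.2,
      ((PySem.List.enumerate ip_port_pairs 0).filter (fun q => q.2 == key)).map (·.1)))

-- ===== PRECONDITION & SPEC =====
def Spec_nodes_by_host (ip_port_pairs : List (String × Int)) (out : List (String × Int × List Int)) : Prop := out = nodes_by_host_alt ip_port_pairs
instance (ip_port_pairs : List (String × Int)) (out : List (String × Int × List Int)) : Decidable (Spec_nodes_by_host ip_port_pairs out) := by unfold Spec_nodes_by_host; infer_instance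

-- ===== CLAIM (what is proved, stated in full; the proofs are below) =====
def Claim_equal_nodes_by_host : Prop := ∀ (ip_port_pairs : List (String × Int)), Dom_nodes_by_host ip_port_pairs → Spec_nodes_by_host ip_port_pairs (nodes_by_host ip_port_pairs)

-- ===== LEMMAS AND PROOFS =====

lemma keys_step (st : PySem.Dict (String × Int) (List Int) × Int) (x : String × Int) :
    ((nodesByHostStep st x).1).keys = PySem.Set.add st.1.keys x := by
  unfold nodesByHostStep
  by_cases h : st.1.contains x = true
  · simp only [h, if_true]
    rw [PySem.Dict.keys_modify, PySem.Dict.keys_insert_of_contains _ _ h, PySem.Set.add_eq_ite,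
        if_pos ((PySem.Dict.contains_iff_mem_keys _ _).1 h)]
  · have h' : st.1.contains x = false := by simpa using h
    simp only [h', Bool.false_eq_true, if_false]
    rw [PySem.Dict.keys_modify,
        PySem.Dict.keys_insert_of_contains _ _ (PySem.Dict.contains_insert_self _ _ _),
        PySem.Dict.keys_insert_of_not_contains _ _ h', PySem.Set.add_eq_ite]
    rw [if_neg (fun hm => by simp [(PySem.Dict.contains_iff_mem_keys st.1 x).2 hm] at h')]

lemma getD_not_contains (d : PySem.Dict (String × Int) (List Int)) (k : String × Int)
    (h : d.contains k = false) : d.getD k [] = [] := by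
  simp [PySem.Dict.getD, (PySem.Dict.get?_eq_none_iff_contains d k).2 h]

lemma getD_step (st : PySem.Dict (String × Int) (List Int) × Int) (x key : String × Int) :
    ((nodesByHostStep st x).1).getD key [] =
      if key = x then st.1.getD x [] ++ [st.2] else st.1.getD key [] := by
  unfold nodesByHostStep
  by_cases h : st.1.contains x = true
  · simp only [h, if_true]
    rw [PySem.Dict.getD_modify]
  · have h' : st.1.contains x = false := by simpa using h
    simp only [h', Bool.false_eq_true, if_false]
    rw [PySem.Dict.getD_modify]
    by_cases hk : key = x
    · simp [hk, getD_not_contains st.1 x h']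
    · simp [hk, PySem.Dict.getD_insert]

lemma keys_loopA (l : List (String × Int)) :
    ∀ (d : PySem.Dict (String × Int) (List Int)) (n : Int),
      ((l.foldl nodesByHostStep (d, n)).1).keys = PySem.Set.update d.keys l := by
  induction l with
  | nil => intro d n; rfl
  | cons x l ih =>
    intro d n
    have : PySem.Set.update d.keys (x :: l) = PySem.Set.update (PySem.Set.add d.keys x) l := rfl
    rw [this, List.foldl_cons]
    have hst : nodesByHostStep (d, n) x = ((nodesByHostStep (d, n) x).1, n + 1) := rfl
    rw [hst, ih]
    rw [keys_step (d, n) x]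

lemma getD_loopA (l : List (String × Int)) :
    ∀ (d : PySem.Dict (String × Int) (List Int)) (n : Int) (key : String × Int),
      ((l.foldl nodesByHostStep (d, n)).1).getD key [] =
        d.getD key [] ++ ((PySem.List.enumerate l n).filter (fun q => q.2 == key)).map (·.1) := by
  induction l with
  | nil => intro d n key; simp [PySem.List.enumerate_nil]
  | cons x l ih =>
    intro d n key
    rw [List.foldl_cons]
    have hst : nodesByHostStep (d, n) x = ((nodesByHostStep (d, n) x).1, n + 1) := rfl
    rw [hst, ih, getD_step (d, n) x key, PySem.List.enumerate_cons]
    by_cases hk : key = x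
    · subst hk
      simp
    · have hx : ¬ (x == key) = true := by simp [beq_iff_eq]; exact fun e => hk e.symm
      simp [hk, hx]

-- ===== VERDICT (by name: the statement is the Claim_ definition above) =====
theorem nodes_by_host_spec : Claim_equal_nodes_by_host := by
  intro l _
  unfold Spec_nodes_by_host nodes_by_host nodes_by_host_alt
  dsimp only
  have hkeys : ((l.foldl nodesByHostStep (PySem.Dict.empty, 0)).1).keys = PySem.List.dedup l := by
    rw [keys_loopA l PySem.Dict.empty 0, PySem.List.dedup_eq_ofList]
    rfl
  have hnd : ((l.foldl nodesByHostStep (PySem.Dict.empty, 0)).1).keys.Nodup := by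
    rw [hkeys, PySem.List.dedup_eq_ofList]; exact PySem.Set.nodup_ofList l
  rw [PySem.Dict.items_eq_map_keys _ hnd [], hkeys, List.map_map]
  refine List.map_congr_left (fun key _ => ?_)
  simp only [Function.comp]
  rw [getD_loopA l PySem.Dict.empty 0 key, PySem.Dict.getD_empty]
  rfl
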